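-- pv_equiv track=rewrite | github.com/dhineshram222/KG_fyp4 | backend/semantic_clusterer.py | _cluster_with_keywords
-- ===== SOURCE A (Python) =====
-- from typing import List, Dict, Tuple, Set, Optional
-- from collections import defaultdict
--
-- def _cluster_with_keywords(texts: List[str], return_as_dict: bool = False) -> Dict[str, List[str]]:
--     """
--     Fallback clustering using keyword matching.
--     """
--     clusters = defaultdict(list)
--
--     # Common topic keywords for fallback clustering
--     topic_keywords = {
--         "linked_list": ["linked", "node", "pointer", "head", "next"],
--         "stack": ["stack", "push", "pop", "lifo", "top"],
--         "queue": ["queue", "enqueue", "dequeue", "fifo", "front", "rear"],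
--         "array": ["array", "index", "element", "contiguous", "random access"],
--         "tree": ["tree", "root", "leaf", "parent", "child", "binary"],
--         "graph": ["graph", "vertex", "edge", "adjacency", "path"],
--         "data_structure": ["data structure", "structure", "organize", "store"],
--         "definition": ["definition", "what is", "means", "refers"],
--         "operations": ["operation", "insert", "delete", "search", "traverse"],
--         "applications": ["application", "used", "example", "implement"],
--     }
--
--     for text in texts:
--         text_lower = text.lower()
--         matched = False
--
--         for topic, keywords in topic_keywords.items():
--             if any(kw in text_lower for kw in keywords):
--                 clusters[topic].append(text)
--                 matched = True
--                 break
--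
--         if not matched:
--             clusters["other"].append(text)
--
--     return dict(clusters)
-- ===== SOURCE B (Python) =====
-- # B: inverted-loop clustering — topics form the OUTER loop; each topic, in table
-- # order, claims every still-unowned text it matches; a second pass groups texts
-- # by owner. No per-text scan over topics, no matched flag, no break, no defaultdict.
--
-- _TOPIC_KEYWORDS = [
--     ("linked_list", ["linked", "node", "pointer", "head", "next"]),
--     ("stack", ["stack", "push", "pop", "lifo", "top"]),
--     ("queue", ["queue", "enqueue", "dequeue", "fifo", "front", "rear"]),
--     ("array", ["array", "index", "element", "contiguous", "random access"]),
--     ("tree", ["tree", "root", "leaf", "parent", "child", "binary"]),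
--     ("graph", ["graph", "vertex", "edge", "adjacency", "path"]),
--     ("data_structure", ["data structure", "structure", "organize", "store"]),
--     ("definition", ["definition", "what is", "means", "refers"]),
--     ("operations", ["operation", "insert", "delete", "search", "traverse"]),
--     ("applications", ["application", "used", "example", "implement"]),
-- ]
--
--
-- def _cluster_with_keywords(texts, return_as_dict=False):
--     lowered = [t.lower() for t in texts]
--     # Phase 1: topic-major sweep. Earlier topics claim texts first, which gives
--     # exactly the first-matching-topic priority of the table order.
--     owner = {}
--     for topic, kws in _TOPIC_KEYWORDS:
--         for i, tl in enumerate(lowered):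
--             if i not in owner and any(kw in tl for kw in kws):
--                 owner[i] = topic
--     # Phase 2: group texts by their owner (unowned -> "other"), in text order;
--     # a cluster key is created at the first text that belongs to it.
--     clusters = {}
--     for i, text in enumerate(texts):
--         clusters.setdefault(owner.get(i, "other"), []).append(text)
--     return clusters
-- ===== Notes on version B (the rewrite author's own statement) =====
-- stated objective: alternative
-- what changed: Inverts the loop nest: instead of scanning the topic table per text with a matched flag and break, B sweeps topics as the outer loop, each topic claiming the still-unowned texts it matches into an owner map, and a second pass groups texts by owner with dict.setdefault.
import Mathlib
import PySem

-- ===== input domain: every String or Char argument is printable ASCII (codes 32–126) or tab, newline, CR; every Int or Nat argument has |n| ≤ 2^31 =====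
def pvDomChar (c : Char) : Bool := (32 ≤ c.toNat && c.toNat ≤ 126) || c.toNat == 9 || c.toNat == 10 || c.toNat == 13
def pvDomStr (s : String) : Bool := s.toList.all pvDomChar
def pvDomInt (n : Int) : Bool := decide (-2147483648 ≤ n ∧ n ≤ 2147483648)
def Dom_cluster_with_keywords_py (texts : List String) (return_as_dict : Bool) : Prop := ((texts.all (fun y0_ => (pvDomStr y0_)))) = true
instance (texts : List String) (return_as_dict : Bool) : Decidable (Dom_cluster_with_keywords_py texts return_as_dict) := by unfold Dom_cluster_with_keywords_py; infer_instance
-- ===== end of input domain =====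

-- B inverts A's loop nest: topics are the outer loop, each claiming the still-unowned
-- texts into an owner map, then a second pass groups texts by owner (objective: alternative).

-- ===== PORT A =====
def pyTopicKeywords : List (String × List String) :=
  [ ("linked_list", ["linked", "node", "pointer", "head", "next"]),
    ("stack", ["stack", "push", "pop", "lifo", "top"]),
    ("queue", ["queue", "enqueue", "dequeue", "fifo", "front", "rear"]),
    ("array", ["array", "index", "element", "contiguous", "random access"]),
    ("tree", ["tree", "root", "leaf", "parent", "child", "binary"]),
    ("graph", ["graph", "vertex", "edge", "adjacency", "path"]),
    ("data_structure", ["data structure", "structure", "organize", "store"]),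
    ("definition", ["definition", "what is", "means", "refers"]),
    ("operations", ["operation", "insert", "delete", "search", "traverse"]),
    ("applications", ["application", "used", "example", "implement"]) ]

-- A's inner 'for topic, keywords … break' loop: returns the updated clusters and the matched flag
def matchLoopA (tl text : String) (clusters : PySem.Dict String (List String)) :
    List (String × List String) → PySem.Dict String (List String) × Bool
  | [] => (clusters, false)
  | (topic, kws) :: rest =>
    if kws.any (fun kw => PySem.Str.isIn kw tl) then
      -- defaultdict append: clusters[topic].append(text)
      (clusters.insert topic (clusters.getD topic [] ++ [text]), true)
    else matchLoopA tl text clusters rest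

def cluster_with_keywords_py (texts : List String) (return_as_dict : Bool) : List (String × List String) :=
  (texts.foldl (fun clusters text =>
      let tl := PySem.Str.lower text
      let r := matchLoopA tl text clusters pyTopicKeywords
      if r.2 then r.1
      else r.1.insert "other" (r.1.getD "other" [] ++ [text]))
    PySem.Dict.empty).items

-- ===== PORT B =====
-- Source B's inner body: 'if i not in owner and any(kw in tl for kw in kws): owner[i] = topic'
def sweepStep (topic : String) (kws : List String) (owner : PySem.Dict Int String)
    (p : Int × String) : PySem.Dict Int String :=
  if !owner.contains p.1 && kws.any (fun kw => PySem.Str.isIn kw p.2) then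
    owner.insert p.1 topic
  else owner

-- Phase 1 of Source B: the topic-major sweep building owner : Dict Int String
def ownerMapB (lowered : List String) : PySem.Dict Int String :=
  pyTopicKeywords.foldl (fun owner row =>
    (PySem.List.enumerate lowered 0).foldl (sweepStep row.1 row.2) owner)
  PySem.Dict.empty

def cluster_with_keywords_py_alt (texts : List String) (return_as_dict : Bool) : List (String × List String) :=
  let lowered := texts.map PySem.Str.lower
  let owner := ownerMapB lowered
  -- Phase 2: clusters.setdefault(owner.get(i, "other"), []).append(text)
  ((PySem.List.enumerate texts 0).foldl (fun clusters p =>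
      let t := owner.getD p.1 "other"
      (clusters.setdefault t []).insert t ((clusters.setdefault t []).getD t [] ++ [p.2]))
    PySem.Dict.empty).items

-- ===== PRECONDITION & SPEC =====
def Spec_cluster_with_keywords_py (texts : List String) (return_as_dict : Bool) (out : List (String × List String)) : Prop := out = cluster_with_keywords_py_alt texts return_as_dict
instance (texts : List String) (return_as_dict : Bool) (out : List (String × List String)) : Decidable (Spec_cluster_with_keywords_py texts return_as_dict out) := by unfold Spec_cluster_with_keywords_py; infer_instance

-- ===== CLAIM (what is proved, stated in full; the proofs are below) =====
def Claim_equal_cluster_with_keywords_py : Prop := ∀ (texts : List String) (return_as_dict : Bool), Dom_cluster_with_keywords_py texts return_as_dict → Spec_cluster_with_keywords_py texts return_as_dict (cluster_with_keywords_py texts return_as_dict)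

-- ===== LEMMAS AND PROOFS =====

-- the first topic of the table whose keywords hit tl (A's per-text scan, as a find?)
def firstTopic (tl : String) : Option String :=
  (pyTopicKeywords.find? (fun r => r.2.any (fun kw => PySem.Str.isIn kw tl))).map (·.1)

def labelOf (tl : String) : String := (firstTopic tl).getD "other"

-- A's nested loop equals one find? over the table
theorem matchLoopA_eq_find (tl text : String) :
    ∀ (rows : List (String × List String)) (clusters : PySem.Dict String (List String)),
      matchLoopA tl text clusters rows =
        match rows.find? (fun r => r.2.any (fun kw => PySem.Str.isIn kw tl)) with
        | some r => (clusters.insert r.1 (clusters.getD r.1 [] ++ [text]), true)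
        | none => (clusters, false) := by
  intro rows
  induction rows with
  | nil => intro clusters; rfl
  | cons row rest ih =>
    intro clusters
    obtain ⟨topic, kws⟩ := row
    rw [List.find?_cons]
    by_cases h : (kws.any fun kw => PySem.Str.isIn kw tl) = true
    · simp only [matchLoopA, h, if_true]
    · simp only [matchLoopA, h, if_false, Bool.false_eq_true]
      simpa [eq_false_of_ne_true h] using ih clusters

-- A's per-text step is 'insert at key labelOf'
theorem stepA_eq (clusters : PySem.Dict String (List String)) (text : String) :
    (let tl := PySem.Str.lower text
     let r := matchLoopA tl text clusters pyTopicKeywords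
     if r.2 then r.1
     else r.1.insert "other" (r.1.getD "other" [] ++ [text])) =
    (let t := labelOf (PySem.Str.lower text)
     clusters.insert t (clusters.getD t [] ++ [text])) := by
  simp only [matchLoopA_eq_find, labelOf, firstTopic]
  cases h : pyTopicKeywords.find? (fun r => r.2.any (fun kw => PySem.Str.isIn kw (PySem.Str.lower text))) with
  | none => simp
  | some r => simp

-- a sweep over pairs none of whose keys is j leaves get? j unchanged
theorem sweep_get?_untouched (topic : String) (kws : List String) (j : Int) :
    ∀ (ps : List (Int × String)) (owner : PySem.Dict Int String),
      (∀ p ∈ ps, p.1 ≠ j) →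
      (ps.foldl (sweepStep topic kws) owner).get? j = owner.get? j := by
  intro ps
  induction ps with
  | nil => intro owner _; rfl
  | cons p rest ih =>
    intro owner h
    rw [List.foldl_cons]
    rw [ih _ (fun q hq => h q (List.mem_cons_of_mem _ hq))]
    unfold sweepStep
    split_ifs with hc
    · exact PySem.Dict.get?_insert_of_ne _ _ (fun he => (h p List.mem_cons_self he.symm))
    · rfl

-- the inner sweep's effect on index j
theorem sweep_get? (topic : String) (kws : List String) (lowered : List String)
    (j : Nat) (hj : j < lowered.length) (owner : PySem.Dict Int String) :
    ((PySem.List.enumerate lowered 0).foldl (sweepStep topic kws) owner).get? (j : Int) =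
      if !owner.contains (j : Int) && kws.any (fun kw => PySem.Str.isIn kw lowered[j]) then
        some topic
      else owner.get? (j : Int) := by
  have hsplit : lowered = lowered.take j ++ lowered[j] :: lowered.drop (j + 1) := by
    conv_lhs => rw [← List.take_append_drop j lowered]
    rw [List.drop_eq_getElem_cons hj]
  have hlen : (lowered.take j).length = j := List.length_take_of_le (le_of_lt hj)
  conv_lhs => rw [hsplit, PySem.List.enumerate_append, hlen, PySem.List.enumerate_cons,
    List.foldl_append, List.foldl_cons]
  have hpre : ∀ p ∈ PySem.List.enumerate (lowered.take j) 0, p.1 ≠ (j : Int) := by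
    intro p hp
    obtain ⟨k, hk, rfl⟩ := (PySem.List.mem_enumerate_iff _ _ _).mp hp
    have : k < j := lt_of_lt_of_le hk (le_of_eq hlen)
    simp; omega
  have hsuf : ∀ p ∈ PySem.List.enumerate (lowered.drop (j + 1)) ((0 : Int) + j + 1), p.1 ≠ (j : Int) := by
    intro p hp
    obtain ⟨k, hk, rfl⟩ := (PySem.List.mem_enumerate_iff _ _ _).mp hp
    omega
  rw [sweep_get?_untouched topic kws (j : Int) _ _ hsuf]
  have hpreget := sweep_get?_untouched topic kws (j : Int) _ owner hpre
  have hcont : (((PySem.List.enumerate (lowered.take j) 0).foldl (sweepStep topic kws) owner)).contains (j : Int)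
      = owner.contains (j : Int) := by
    rw [PySem.Dict.contains_eq_isSome_get?, PySem.Dict.contains_eq_isSome_get?, hpreget]
  simp only [sweepStep, zero_add] at hpreget hcont ⊢
  rw [hcont]
  split_ifs with hc
  · exact PySem.Dict.get?_insert_self _ _ _
  · exact hpreget

-- the outer (topic) loop: get? j = the old value, else the first matching row
theorem rows_get? (lowered : List String) (j : Nat) (hj : j < lowered.length) :
    ∀ (rows : List (String × List String)) (owner : PySem.Dict Int String),
      ((rows.foldl (fun owner row =>
          (PySem.List.enumerate lowered 0).foldl (sweepStep row.1 row.2) owner) owner).get? (j : Int)) =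
        (owner.get? (j : Int)).or
          ((rows.find? (fun r => r.2.any (fun kw => PySem.Str.isIn kw lowered[j]))).map (·.1)) := by
  intro rows
  induction rows with
  | nil => intro owner; simp
  | cons r rest ih =>
    intro owner
    rw [List.foldl_cons, ih, sweep_get? r.1 r.2 lowered j hj owner, List.find?_cons]
    cases howner : owner.get? (j : Int) with
    | some t =>
      have hc : owner.contains (j : Int) = true := by
        rw [PySem.Dict.contains_eq_isSome_get?, howner]; rfl
      simp [hc]
    | none =>
      have hc : owner.contains (j : Int) = false := by
        rw [PySem.Dict.contains_eq_isSome_get?, howner]; rfl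
      cases hm : r.2.any (fun kw => PySem.Str.isIn kw lowered[j]) with
      | true => simp [hc]
      | false => simp [hc]

theorem ownerMapB_getD (texts : List String) (j : Nat) (hj : j < texts.length) :
    (ownerMapB (texts.map PySem.Str.lower)).getD (j : Int) "other" =
      labelOf (PySem.Str.lower texts[j]) := by
  have hj' : j < (texts.map PySem.Str.lower).length := by simpa using hj
  rw [PySem.Dict.getD_eq_get?_getD]
  unfold ownerMapB
  rw [rows_get? (texts.map PySem.Str.lower) j hj' pyTopicKeywords PySem.Dict.empty]
  simp only [PySem.Dict.get?_empty, Option.none_or, labelOf, firstTopic, List.getElem_map]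

-- Source B's 'clusters.setdefault(t, []).append(text)' equals a plain insert-append
theorem setdefault_append_eq (d : PySem.Dict String (List String)) (t : String) (x : String) :
    (d.setdefault t []).insert t ((d.setdefault t []).getD t [] ++ [x]) =
      d.insert t (d.getD t [] ++ [x]) := by
  by_cases hc : d.contains t = true
  · rw [PySem.Dict.setdefault_of_contains _ _ hc]
  · have hc' : d.contains t = false := eq_false_of_ne_true hc
    rw [PySem.Dict.setdefault_of_not_contains _ _ hc',
      PySem.Dict.getD_insert_self, PySem.Dict.insert_insert_self,
      PySem.Dict.getD_of_not_contains _ _ hc']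

-- ===== VERDICT (by name: the statement is the Claim_ definition above) =====
theorem cluster_with_keywords_py_spec : Claim_equal_cluster_with_keywords_py := by
  intro texts return_as_dict _
  unfold Spec_cluster_with_keywords_py cluster_with_keywords_py cluster_with_keywords_py_alt
  congr 1
  -- A's fold, rewritten per-text to 'insert at labelOf'
  have hA : (fun (clusters : PySem.Dict String (List String)) (text : String) =>
      let tl := PySem.Str.lower text
      let r := matchLoopA tl text clusters pyTopicKeywords
      if r.2 then r.1
      else r.1.insert "other" (r.1.getD "other" [] ++ [text])) =
      (fun clusters text =>
        let t := labelOf (PySem.Str.lower text)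
        clusters.insert t (clusters.getD t [] ++ [text])) := by
    funext clusters text
    exact stepA_eq clusters text
  rw [hA]
  -- B's fold, rewritten per-pair using setdefault_append_eq and ownerMapB_getD
  have hB : ∀ (clusters : PySem.Dict String (List String)) (p : Int × String),
      p ∈ PySem.List.enumerate texts 0 →
      (let t := (ownerMapB (texts.map PySem.Str.lower)).getD p.1 "other"
       (clusters.setdefault t []).insert t ((clusters.setdefault t []).getD t [] ++ [p.2])) =
      (let t := labelOf (PySem.Str.lower p.2)
       clusters.insert t (clusters.getD t [] ++ [p.2])) := by
    intro clusters p hp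
    obtain ⟨k, hk, rfl⟩ := (PySem.List.mem_enumerate_iff _ _ _).mp hp
    simp only [zero_add]
    rw [setdefault_append_eq, ownerMapB_getD texts k hk]
  rw [PySem.List.foldl_congr_mem (PySem.List.enumerate texts 0) _ _ PySem.Dict.empty hB]
  -- fold over enumerate, body ignoring the index = fold over the list itself
  conv_lhs => rw [← PySem.List.map_snd_enumerate texts 0]
  rw [List.foldl_map]
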